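-- pv_equiv track=rewrite | github.com/Julien-Wiegandt/code-jam-playground | others/binary_trees.py | minWay
-- ===== SOURCE A (Python) =====
-- def minWay(bdd, sommet):
--     if(sommet == 1):
--         return []
--     elif(bdd[sommet][2] == 0):
--         dic = minWay(bdd, bdd[sommet][3])
--         dic.append(1)
--         return dic
--     else:
--         dic = minWay(bdd, bdd[sommet][2])
--         dic.append(0)
--         return dic
-- ===== SOURCE B (Python) =====
-- def minWay(bdd, sommet):
--     # phase 1: record the chain of non-terminal nodes visited on the way to 1
--     nodes = []
--     while sommet != 1:
--         nodes.append(sommet)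
--         row = bdd[sommet]
--         sommet = row[3] if row[2] == 0 else row[2]
--     # phase 2: read each node's bit, nearest-to-1 node first
--     return [1 if bdd[s][2] == 0 else 0 for s in reversed(nodes)]
-- ===== Notes on version B (the rewrite author's own statement) =====
-- stated objective: alternative
-- what changed: A's recursion that appends bits while unwinding is replaced by a two-phase iterative algorithm: a loop first collects the list of visited nodes, then a second reversed pass maps each node to its bit.
import Mathlib
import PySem

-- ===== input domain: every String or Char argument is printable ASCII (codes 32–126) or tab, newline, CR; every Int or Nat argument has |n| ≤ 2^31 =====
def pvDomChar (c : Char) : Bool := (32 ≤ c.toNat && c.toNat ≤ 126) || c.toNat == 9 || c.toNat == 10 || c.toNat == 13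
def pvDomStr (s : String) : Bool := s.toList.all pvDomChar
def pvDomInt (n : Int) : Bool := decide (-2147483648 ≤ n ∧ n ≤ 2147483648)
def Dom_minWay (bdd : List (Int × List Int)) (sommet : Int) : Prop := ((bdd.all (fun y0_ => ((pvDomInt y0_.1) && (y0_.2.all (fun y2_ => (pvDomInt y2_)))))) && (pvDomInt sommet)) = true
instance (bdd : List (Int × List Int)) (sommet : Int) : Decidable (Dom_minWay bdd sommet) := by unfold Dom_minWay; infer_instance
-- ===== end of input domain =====

-- B replaces A's unwind-append recursion by a two-phase algorithm (collect the node
-- chain, then map each node to its bit in a reversed second pass); equal return values on Pre_.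

-- ===== PORT A =====
-- A's recursion, made total with a fuel counter (bdd.length + 1 bounds the recursion
-- depth whenever the Python terminates: the visited non-terminal nodes are distinct
-- keys of bdd); `none` = Python raises (KeyError/IndexError or a cyclic chain).
def minWayAuxA (bdd : List (Int × List Int)) : Nat → Int → Option (List Int)
  | 0, _ => none
  | fuel + 1, sommet =>
    if sommet = 1 then some []
    else
      match PySem.Dict.get? (PySem.Dict.mk bdd) sommet with      -- bdd[sommet]
      | none => none
      | some row =>
        match PySem.List.pyGet? row 2 with                       -- bdd[sommet][2]
        | none => none
        | some t2 =>
          if t2 = 0 then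
            match PySem.List.pyGet? row 3 with                   -- bdd[sommet][3]
            | none => none
            | some t3 => (minWayAuxA bdd fuel t3).map (fun dic => dic ++ [1])
          else
            (minWayAuxA bdd fuel t2).map (fun dic => dic ++ [0])

def minWay (bdd : List (Int × List Int)) (sommet : Int) : List Int :=
  (minWayAuxA bdd (bdd.length + 1) sommet).getD []

-- ===== PORT B =====
-- phase 1 of B: the while-loop collecting the visited nodes, fuel-bounded;
-- `none` = the loop raises (bad lookup) or never reaches 1.
def pvChain (bdd : List (Int × List Int)) : Nat → Int → Option (List Int)
  | 0, _ => none
  | fuel + 1, sommet =>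
    if sommet = 1 then some []
    else
      match PySem.Dict.get? (PySem.Dict.mk bdd) sommet with      -- row = bdd[sommet]
      | none => none
      | some row =>
        match PySem.List.pyGet? row 2 with                       -- row[2]
        | none => none
        | some t2 =>
          if t2 = 0 then
            match PySem.List.pyGet? row 3 with                   -- row[3]
            | none => none
            | some t3 => (pvChain bdd fuel t3).map (fun ns => sommet :: ns)
          else
            (pvChain bdd fuel t2).map (fun ns => sommet :: ns)

-- phase 2 of B: one node's bit, `1 if bdd[s][2] == 0 else 0` (none = raise)
def pvBit? (bdd : List (Int × List Int)) (s : Int) : Option Int :=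
  match PySem.Dict.get? (PySem.Dict.mk bdd) s with
  | none => none
  | some row =>
    match PySem.List.pyGet? row 2 with
    | none => none
    | some t2 => some (if t2 = 0 then 1 else 0)

-- the list comprehension over the nodes (a failure anywhere aborts the whole list)
def pvBits (bdd : List (Int × List Int)) : List Int → Option (List Int)
  | [] => some []
  | s :: rest => (pvBit? bdd s).bind (fun b => (pvBits bdd rest).map (fun bs => b :: bs))

def minWay_alt (bdd : List (Int × List Int)) (sommet : Int) : List Int :=
  match pvChain bdd (bdd.length + 1) sommet with
  | none => []
  | some nodes => (pvBits bdd nodes.reverse).getD []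

-- ===== PRECONDITION & SPEC =====
-- one step of the chain: from sommet to the next node (none = lookup failure)
def pvStep (bdd : List (Int × List Int)) (sommet : Int) : Option Int :=
  match PySem.Dict.get? (PySem.Dict.mk bdd) sommet with
  | none => none
  | some row =>
    match PySem.List.pyGet? row 2 with
    | none => none
    | some t2 => if t2 = 0 then PySem.List.pyGet? row 3 else some t2

def pvIter (bdd : List (Int × List Int)) : Nat → Int → Option Int
  | 0, s => some s
  | n + 1, s => (pvStep bdd s).bind (pvIter bdd n)

-- Pre_: the chain starting at sommet reaches the terminal node 1 (reachability in the
-- input graph); exactly the inputs where Python A returns instead of raising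
-- KeyError/IndexError or recursing forever. Within bdd.length steps suffices because
-- the nodes visited before reaching 1 are distinct keys of bdd.
def Pre_minWay (bdd : List (Int × List Int)) (sommet : Int) : Prop :=
  ((List.range (bdd.length + 1)).any (fun n => pvIter bdd n sommet == some 1)) = true
instance (bdd : List (Int × List Int)) (sommet : Int) : Decidable (Pre_minWay bdd sommet) := by unfold Pre_minWay; infer_instance

def pvWitness_minWay : (List (Int × List Int)) × Int := ([(2, [0, 0, 1, 0])], 2)

def Spec_minWay (bdd : List (Int × List Int)) (sommet : Int) (out : List Int) : Prop := out = minWay_alt bdd sommet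
instance (bdd : List (Int × List Int)) (sommet : Int) (out : List Int) : Decidable (Spec_minWay bdd sommet out) := by unfold Spec_minWay; infer_instance

-- ===== CLAIM (what is proved, stated in full; the proofs are below) =====
def Claim_equal_minWay : Prop := ∀ (bdd : List (Int × List Int)) (sommet : Int), Dom_minWay bdd sommet → Pre_minWay bdd sommet → Spec_minWay bdd sommet (minWay bdd sommet)

-- ===== LEMMAS AND PROOFS =====

-- bit-mapping over a snoc: evaluate the prefix, then the last node's bit
theorem pvBits_append (bdd : List (Int × List Int)) (l : List Int) (x : Int) :
    pvBits bdd (l ++ [x])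
      = (pvBits bdd l).bind (fun bs => (pvBit? bdd x).map (fun b => bs ++ [b])) := by
  induction l with
  | nil =>
    simp only [List.nil_append, pvBits]
    cases pvBit? bdd x <;> simp
  | cons s rest ih =>
    simp only [List.cons_append, pvBits, ih]
    cases pvBit? bdd s <;> cases pvBits bdd rest <;> cases pvBit? bdd x <;> simp

-- A's recursion computes exactly B's phase 2 applied to the reversed phase-1 chain
theorem minWayAuxA_eq_bits (bdd : List (Int × List Int)) :
    ∀ (fuel : Nat) (sommet : Int),
      minWayAuxA bdd fuel sommet
        = (pvChain bdd fuel sommet).bind (fun ns => pvBits bdd ns.reverse) := by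
  intro fuel
  induction fuel with
  | zero => intro s; rfl
  | succ f ih =>
    intro s
    simp only [minWayAuxA, pvChain]
    by_cases h1 : s = 1
    · simp [h1, pvBits]
    · simp only [if_neg h1]
      cases hrow : PySem.Dict.get? (PySem.Dict.mk bdd) s with
      | none => rfl
      | some row =>
        simp only []
        cases h2g : PySem.List.pyGet? row 2 with
        | none => rfl
        | some t2 =>
          simp only []
          have hbit : pvBit? bdd s = some (if t2 = 0 then 1 else 0) := by
            simp [pvBit?, hrow, h2g]
          by_cases h2 : t2 = 0
          · simp only [if_pos h2]
            cases PySem.List.pyGet? row 3 with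
            | none => rfl
            | some t3 =>
              simp only [ih]
              cases pvChain bdd f t3 with
              | none => simp
              | some ns =>
                simp only [Option.map_some, Option.bind_some, List.reverse_cons,
                  pvBits_append, hbit]
                cases pvBits bdd ns.reverse <;> simp [h2]
          · simp only [if_neg h2, ih]
            cases pvChain bdd f t2 with
            | none => simp
            | some ns =>
              simp only [Option.map_some, Option.bind_some, List.reverse_cons,
                pvBits_append, hbit]
              cases pvBits bdd ns.reverse <;> simp [h2]

-- ===== VERDICT (by name: the statement is the Claim_ definition above) =====
theorem minWay_spec : Claim_equal_minWay := by
  intro bdd sommet _ _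
  unfold Spec_minWay minWay minWay_alt
  rw [minWayAuxA_eq_bits]
  cases pvChain bdd (bdd.length + 1) sommet <;> simp
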